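-- pv_equiv track=rewrite | github.com/jonnivoss/loputoo | main.py | count_pairs_from_multiple_words
-- ===== SOURCE A (Python) =====
-- def separate_into_pairs(word):
--     pairs = {}
--     for i in range(len(word) - 1):
--         pair = word[i:i + 2]
--         if pair in pairs:
--             pairs[pair] += 1
--         else:
--             pairs[pair] = 1
--     return pairs
--
-- def count_pairs_from_multiple_words(words_with_count):
--     all_pairs = {}
--     for word, counts in words_with_count.items():
--         pairs = separate_into_pairs(word)
--         for pair, pair_count in pairs.items():
--             if pair in all_pairs:
--                 all_pairs[pair] += pair_count * counts['kokku']
--             else: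
--                 all_pairs[pair] = pair_count * counts['kokku']
--     return all_pairs
-- ===== SOURCE B (Python) =====
-- def count_pairs_from_multiple_words(words_with_count):
--     all_pairs = {}
--     for word, counts in words_with_count.items():
--         for i in range(len(word) - 1):
--             pair = word[i:i + 2]
--             all_pairs[pair] = all_pairs.get(pair, 0) + counts['kokku']
--     return all_pairs
-- ===== Notes on version B (the rewrite author's own statement) =====
-- stated objective: simpler
-- what changed: B drops the separate_into_pairs helper and the intermediate per-word pair-count dict entirely: one streaming loop adds counts['kokku'] directly into the global dict for every adjacent pair occurrence, instead of A's build-a-counter-then-reweight two-phase structure.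
import Mathlib
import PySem

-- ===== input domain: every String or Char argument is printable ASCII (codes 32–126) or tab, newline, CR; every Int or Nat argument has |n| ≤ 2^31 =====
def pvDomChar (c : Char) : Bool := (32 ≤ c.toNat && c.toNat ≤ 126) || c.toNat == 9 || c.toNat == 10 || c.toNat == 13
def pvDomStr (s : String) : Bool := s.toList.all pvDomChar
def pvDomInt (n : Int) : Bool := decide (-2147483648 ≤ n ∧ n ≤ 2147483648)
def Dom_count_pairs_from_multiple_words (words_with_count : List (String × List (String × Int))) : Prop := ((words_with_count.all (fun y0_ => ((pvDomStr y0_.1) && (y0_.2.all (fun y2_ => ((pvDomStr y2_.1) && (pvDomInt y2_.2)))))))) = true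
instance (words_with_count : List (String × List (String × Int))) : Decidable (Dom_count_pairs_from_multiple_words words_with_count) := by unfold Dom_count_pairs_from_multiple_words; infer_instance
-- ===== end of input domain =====

-- B drops the per-word pair table: one streaming pass adds counts['kokku'] per pair occurrence
-- directly into the global dict (objective: simpler). Equivalence on the return value is proved
-- for every input where A returns (Pre_: counts dicts of words with ≥ 2 chars have key "kokku"; elsewhere A raises KeyError).

-- ===== PORT A =====
-- Python dict arguments arrive as association lists; PySem.Dict.ofList rebuilds the dict
-- (last value wins on duplicate keys, insertion order kept), exactly as Python constructed it.
def separate_into_pairs (word : String) : PySem.Dict String Int :=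
  (PySem.List.pyRange 0 (PySem.Str.len word - 1) 1).foldl
    (fun pairs i =>
      let pair := PySem.Str.slice word (some i) (some (i + 2))
      if pairs.contains pair then pairs.insert pair (pairs.getD pair 0 + 1)
      else pairs.insert pair 1)
    PySem.Dict.empty

-- counts['kokku'] is ported as getD "kokku" 0: exact under Pre_ (the key is present; Python raises KeyError otherwise).
def count_pairs_from_multiple_words (words_with_count : List (String × List (String × Int))) : List (String × Int) :=
  ((PySem.Dict.ofList words_with_count).items.foldl
    (fun all_pairs wc =>
      let pairs := separate_into_pairs wc.1
      let counts := PySem.Dict.ofList wc.2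
      pairs.items.foldl
        (fun all_pairs pc =>
          if all_pairs.contains pc.1 then
            all_pairs.insert pc.1 (all_pairs.getD pc.1 0 + pc.2 * counts.getD "kokku" 0)
          else all_pairs.insert pc.1 (pc.2 * counts.getD "kokku" 0))
        all_pairs)
    PySem.Dict.empty).items

-- ===== PORT B =====
def count_pairs_from_multiple_words_alt (words_with_count : List (String × List (String × Int))) : List (String × Int) :=
  ((PySem.Dict.ofList words_with_count).items.foldl
    (fun all_pairs wc =>
      (PySem.List.pyRange 0 (PySem.Str.len wc.1 - 1) 1).foldl
        (fun all_pairs i =>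
          let pair := PySem.Str.slice wc.1 (some i) (some (i + 2))
          all_pairs.insert pair (all_pairs.getD pair 0 + (PySem.Dict.ofList wc.2).getD "kokku" 0))
        all_pairs)
    PySem.Dict.empty).items

-- ===== PRECONDITION & SPEC =====
-- Pre_: for every word of at least 2 characters, its counts dict (after Python's dict construction
-- collapses duplicate keys) contains the key "kokku" — exactly the inputs on which A returns;
-- elsewhere counts['kokku'] raises KeyError (words shorter than 2 chars have no pairs, so their
-- counts dict is never consulted).
def Pre_count_pairs_from_multiple_words (words_with_count : List (String × List (String × Int))) : Prop :=
  ∀ wc ∈ (PySem.Dict.ofList words_with_count).items,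
    2 ≤ PySem.Str.len wc.1 → (PySem.Dict.ofList wc.2).contains "kokku" = true
instance (words_with_count : List (String × List (String × Int))) : Decidable (Pre_count_pairs_from_multiple_words words_with_count) := by unfold Pre_count_pairs_from_multiple_words; infer_instance
def pvWitness_count_pairs_from_multiple_words : (List (String × List (String × Int))) :=
  [("abab", [("kokku", 2)]), ("bc", [("kokku", 3), ("muu", 7)])]

def Spec_count_pairs_from_multiple_words (words_with_count : List (String × List (String × Int))) (out : List (String × Int)) : Prop := out = count_pairs_from_multiple_words_alt words_with_count
instance (words_with_count : List (String × List (String × Int))) (out : List (String × Int)) : Decidable (Spec_count_pairs_from_multiple_words words_with_count out) := by unfold Spec_count_pairs_from_multiple_words; infer_instance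

-- ===== CLAIM (what is proved, stated in full; the proofs are below) =====
def Claim_equal_count_pairs_from_multiple_words : Prop := ∀ (words_with_count : List (String × List (String × Int))), Dom_count_pairs_from_multiple_words words_with_count → Pre_count_pairs_from_multiple_words words_with_count → Spec_count_pairs_from_multiple_words words_with_count (count_pairs_from_multiple_words words_with_count)

-- ===== LEMMAS AND PROOFS =====

-- the list of adjacent pairs of a word, in order
def pairsOf (w : String) : List String :=
  (PySem.List.pyRange 0 (PySem.Str.len w - 1) 1).map
    (fun i => PySem.Str.slice w (some i) (some (i + 2)))

-- the if/else around "d[p] += v" / "d[p] = v" is one insert of (old value or 0) + v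
theorem bump_step_eq (d : PySem.Dict String Int) (p : String) (v : Int) :
    (if d.contains p then d.insert p (d.getD p 0 + v) else d.insert p v)
      = d.insert p (d.getD p 0 + v) := by
  cases h : d.contains p with
  | true => simp
  | false => simp [PySem.Dict.getD_of_not_contains d 0 h]
theorem getD_foldl_bump {α : Type} (key : α → String) (g : α → Int) (l : List α)
    (d : PySem.Dict String Int) (x : String) :
    (l.foldl (fun d a => d.insert (key a) (d.getD (key a) 0 + g a)) d).getD x 0
      = d.getD x 0 + ((l.filter (fun a => key a == x)).map g).sum := by
  induction l generalizing d with
  | nil => simp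
  | cons a t ih =>
    simp only [List.foldl_cons, ih, List.filter_cons]
    by_cases hx : key a = x
    · subst hx; simp; ring
    · simp [PySem.Dict.getD_insert, hx, Ne.symm hx]
theorem filter_beq_of_nodup (l : List String) (x : String) (h : l.Nodup) :
    l.filter (fun q => q == x) = if x ∈ l then [x] else [] := by
  induction l with
  | nil => simp
  | cons a t ih =>
    simp only [List.nodup_cons] at h
    rcases h with ⟨ha, ht⟩
    by_cases hx : a = x
    · subst hx
      simp [ha]
      exact fun b hb hbx => ha (hbx ▸ hb)
    · simp [hx, ih ht, Ne.symm hx]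

theorem per_word_eq (ps : List String) (k : Int) (acc : PySem.Dict String Int)
    (h : acc.keys.Nodup) :
    (PySem.Dict.counter ps).items.foldl
        (fun d pc => d.insert pc.1 (d.getD pc.1 0 + pc.2 * k)) acc
      = ps.foldl (fun d p => d.insert p (d.getD p 0 + k)) acc := by
  have hndL : ((PySem.Dict.counter ps).items.foldl
      (fun d pc => d.insert pc.1 (d.getD pc.1 0 + pc.2 * k)) acc).keys.Nodup :=
    PySem.Dict.nodup_keys_foldl_insert_key _ Prod.fst _ acc h
  have hndR : (ps.foldl (fun d p => d.insert p (d.getD p 0 + k)) acc).keys.Nodup :=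
    PySem.Dict.nodup_keys_foldl_insert ps _ acc h
  have hkeys : ((PySem.Dict.counter ps).items.foldl
      (fun d pc => d.insert pc.1 (d.getD pc.1 0 + pc.2 * k)) acc).keys
      = (ps.foldl (fun d p => d.insert p (d.getD p 0 + k)) acc).keys := by
    rw [PySem.Dict.keys_foldl_insert_key _ Prod.fst, PySem.Dict.keys_foldl_insert,
      PySem.Dict.items_counter]
    simp only [List.map_map]
    rw [PySem.Set.update_eq_append_filter, PySem.Set.update_eq_append_filter]
    simp [Function.comp_def, PySem.Set.ofList_ofList]
  have hgetD : ∀ x, ((PySem.Dict.counter ps).items.foldl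
      (fun d pc => d.insert pc.1 (d.getD pc.1 0 + pc.2 * k)) acc).getD x 0
      = (ps.foldl (fun d p => d.insert p (d.getD p 0 + k)) acc).getD x 0 := by
    intro x
    rw [getD_foldl_bump Prod.fst (fun pc => pc.2 * k), getD_foldl_bump (fun p => p) (fun _ => k)]
    congr 1
    rw [PySem.Dict.items_counter, List.filter_map]
    simp only [Function.comp_def, List.map_map]
    rw [filter_beq_of_nodup _ x (PySem.Set.nodup_ofList ps)]
    by_cases hm : x ∈ ps
    · rw [if_pos ((PySem.Set.mem_ofList ps x).mpr hm)]
      simp [List.map_const', List.sum_replicate, List.count_eq_countP,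
        List.countP_eq_length_filter]
    · rw [if_neg (fun hc => hm ((PySem.Set.mem_ofList ps x).mp hc))]
      have : ps.filter (fun p => p == x) = [] :=
        List.filter_eq_nil_iff.mpr (fun b hb hbx => hm ((beq_iff_eq.mp hbx) ▸ hb))
      simp [this]
  apply PySem.Dict.ext
  rw [PySem.Dict.items_eq_map_keys _ hndL 0, PySem.Dict.items_eq_map_keys _ hndR 0, hkeys]
  exact List.map_congr_left (fun q _ => by rw [hgetD q])

theorem outer_eq (L : List (String × List (String × Int))) :
    ∀ (acc : PySem.Dict String Int), acc.keys.Nodup →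
    L.foldl (fun all_pairs wc =>
        (PySem.Dict.counter (pairsOf wc.1)).items.foldl
          (fun all_pairs pc =>
            if all_pairs.contains pc.1 then
              all_pairs.insert pc.1 (all_pairs.getD pc.1 0 + pc.2 * (PySem.Dict.ofList wc.2).getD "kokku" 0)
            else all_pairs.insert pc.1 (pc.2 * (PySem.Dict.ofList wc.2).getD "kokku" 0))
          all_pairs) acc
      = L.foldl (fun all_pairs wc =>
        (PySem.List.pyRange 0 (PySem.Str.len wc.1 - 1) 1).foldl
          (fun all_pairs i =>
            all_pairs.insert (PySem.Str.slice wc.1 (some i) (some (i + 2)))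
              (all_pairs.getD (PySem.Str.slice wc.1 (some i) (some (i + 2))) 0
                + (PySem.Dict.ofList wc.2).getD "kokku" 0))
          all_pairs) acc := by
  induction L with
  | nil => intro acc _; rfl
  | cons wc t ih =>
    intro acc h
    simp only [List.foldl_cons]
    have hstep : (PySem.Dict.counter (pairsOf wc.1)).items.foldl
        (fun all_pairs pc =>
          if all_pairs.contains pc.1 then
            all_pairs.insert pc.1 (all_pairs.getD pc.1 0 + pc.2 * (PySem.Dict.ofList wc.2).getD "kokku" 0)
          else all_pairs.insert pc.1 (pc.2 * (PySem.Dict.ofList wc.2).getD "kokku" 0)) acc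
        = (PySem.List.pyRange 0 (PySem.Str.len wc.1 - 1) 1).foldl
          (fun all_pairs i =>
            all_pairs.insert (PySem.Str.slice wc.1 (some i) (some (i + 2)))
              (all_pairs.getD (PySem.Str.slice wc.1 (some i) (some (i + 2))) 0
                + (PySem.Dict.ofList wc.2).getD "kokku" 0)) acc := by
      simp only [bump_step_eq]
      rw [per_word_eq _ _ acc h, pairsOf, List.foldl_map]
    rw [hstep]
    exact ih _ (PySem.Dict.nodup_keys_foldl_insert_key _
      (fun i => PySem.Str.slice wc.1 (some i) (some (i + 2))) _ acc h)

theorem separate_into_pairs_eq_counter (w : String) :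
    separate_into_pairs w = PySem.Dict.counter (pairsOf w) := by
  unfold separate_into_pairs pairsOf
  rw [← PySem.Dict.foldl_insert_getD_add_one_eq_counter, List.foldl_map]
  simp only [bump_step_eq]

-- ===== VERDICT (by name: the statement is the Claim_ definition above) =====
theorem count_pairs_from_multiple_words_spec : Claim_equal_count_pairs_from_multiple_words := by
  intro words_with_count _ _
  unfold Spec_count_pairs_from_multiple_words
  simp only [count_pairs_from_multiple_words, count_pairs_from_multiple_words_alt,
    separate_into_pairs_eq_counter]
  exact congrArg PySem.Dict.items (outer_eq _ PySem.Dict.empty (by simp))
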